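-- pv_equiv track=rewrite | github.com/mvanwoensel/Similiar_Concepts | FindItOut/CSQA/clip_based_game_generation.py | calc_question_overlap
-- ===== SOURCE A (Python) =====
-- def calc_question_overlap(question_concepts):
-- 	# we can define the similarity with different functions
-- 	# such as overlapped concepts, PMI
-- 	question_sim = {}
-- 	for q_id in question_concepts:
-- 		question_sim[q_id] = {}
-- 		for q_id_ in question_concepts:
-- 			if q_id_ == q_id:
-- 				# question_sim[q_id][q_id_] = len(question_concepts[q_id])
-- 				# don't record sim with self
-- 				continue
-- 			question_sim[q_id][q_id_] = len(set(question_concepts[q_id]) & set(question_concepts[q_id_])) # intersection of sets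
-- 	return question_sim
-- ===== SOURCE B (Python) =====
-- def calc_question_overlap(question_concepts):
--     # Inverted index: concept -> list of questions containing it; pair counts
--     # come from incrementing over each concept's bucket instead of computing
--     # a set intersection for every ordered pair of questions.
--     items = list(question_concepts.items())
--     inv = {}
--     for q, cs in items:
--         for c in set(cs):
--             inv.setdefault(c, []).append(q)
--     pair_count = {}
--     for bucket in inv.values():
--         for q in bucket:
--             for q2 in bucket:
--                 if q2 != q:
--                     pair_count[(q, q2)] = pair_count.get((q, q2), 0) + 1
--     return {q: {q2: pair_count.get((q, q2), 0) for q2, _ in items if q2 != q}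
--             for q, _ in items}
-- ===== Notes on version B (the rewrite author's own statement) =====
-- stated objective: alternative
-- what changed: Replaces the per-ordered-pair set-intersection computation with an inverted index from concept to the questions containing it, counting shared concepts into a pair counter and reading the all-pairs table from it (measured ~2.7x but unconfirmed at the largest size, so no speed claim).
import Mathlib
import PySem

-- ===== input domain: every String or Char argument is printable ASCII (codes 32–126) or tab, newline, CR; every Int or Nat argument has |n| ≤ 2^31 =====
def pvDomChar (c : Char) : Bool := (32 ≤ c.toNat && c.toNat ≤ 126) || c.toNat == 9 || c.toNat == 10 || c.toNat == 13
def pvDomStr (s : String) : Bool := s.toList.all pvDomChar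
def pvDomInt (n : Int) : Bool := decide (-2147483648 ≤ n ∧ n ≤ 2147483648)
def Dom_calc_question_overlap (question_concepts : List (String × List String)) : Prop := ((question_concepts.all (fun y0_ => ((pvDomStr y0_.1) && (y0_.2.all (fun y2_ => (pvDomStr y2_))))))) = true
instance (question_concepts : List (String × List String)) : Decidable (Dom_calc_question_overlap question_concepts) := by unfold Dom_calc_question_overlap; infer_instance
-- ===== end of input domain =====

-- B replaces the per-pair set intersections with an inverted index (concept -> questions)
-- whose buckets are counted into a pair counter (a different algorithm of similar cost).

-- ===== PORT A =====
-- question_concepts[q] (dict lookup; the key always present when A does it)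
def pvLookA (qc : List (String × List String)) (q : String) : List String :=
  (PySem.Dict.mk qc).getD q []

def calc_question_overlap (question_concepts : List (String × List String)) : List (String × List (String × Int)) :=
  -- question_sim = {}; for q_id in …: question_sim[q_id] = {}; for q_id_ in …: …
  let question_sim : PySem.Dict String (PySem.Dict String Int) :=
    question_concepts.foldl (fun question_sim p =>
      let inner : PySem.Dict String Int :=
        question_concepts.foldl (fun inner p2 =>
          if p2.1 == p.1 then inner  -- don't record sim with self (continue)
          else inner.insert p2.1
            ((PySem.Set.inter (PySem.Set.ofList (pvLookA question_concepts p.1))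
                (PySem.Set.ofList (pvLookA question_concepts p2.1))).length : Int))
          PySem.Dict.empty
      question_sim.insert p.1 inner) PySem.Dict.empty
  question_sim.items.map (fun kv => (kv.1, kv.2.items))

-- ===== PORT B =====
def calc_question_overlap_alt (question_concepts : List (String × List String)) : List (String × List (String × Int)) :=
  -- inv = {}; for q, cs in items: for c in set(cs): inv.setdefault(c, []).append(q)
  let inv : PySem.Dict String (List String) :=
    question_concepts.foldl (fun inv p =>
      (PySem.Set.ofList p.2).foldl (fun inv c => inv.modify c [] (· ++ [p.1])) inv)
      PySem.Dict.empty
  -- pair_count = {}; for bucket in inv.values(): for q in bucket: for q2 in bucket: …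
  let pair_count : PySem.Dict (String × String) Int :=
    inv.values.foldl (fun pair_count bucket =>
      bucket.foldl (fun pair_count q =>
        bucket.foldl (fun pair_count q2 =>
          if q2 != q then pair_count.modify (q, q2) 0 (· + 1) else pair_count)
          pair_count) pair_count) PySem.Dict.empty
  -- {q: {q2: pair_count.get((q, q2), 0) for q2, _ in items if q2 != q} for q, _ in items}
  question_concepts.map (fun p =>
    (p.1, (question_concepts.filter (fun p2 => p2.1 != p.1)).map
      (fun p2 => (p2.1, pair_count.getD (p.1, p2.1) 0))))

-- ===== PRECONDITION & SPEC =====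
-- Pre_ excludes association lists with a repeated key: they do not represent any Python
-- dict (dict keys are unique, so the tested inputs all satisfy Pre_), and what such a
-- list denotes under the first-binding convention is not defined by the Python source.
def Pre_calc_question_overlap (question_concepts : List (String × List String)) : Prop :=
  (question_concepts.map (fun p => p.1)).Nodup
instance (question_concepts : List (String × List String)) : Decidable (Pre_calc_question_overlap question_concepts) := by unfold Pre_calc_question_overlap; infer_instance

def pvWitness_calc_question_overlap : (List (String × List String)) :=
  [("q1", ["a", "b", "b"]), ("q2", ["b", "c"]), ("q3", [])]

def Spec_calc_question_overlap (question_concepts : List (String × List String)) (out : List (String × List (String × Int))) : Prop := out = calc_question_overlap_alt question_concepts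
instance (question_concepts : List (String × List String)) (out : List (String × List (String × Int))) : Decidable (Spec_calc_question_overlap question_concepts out) := by unfold Spec_calc_question_overlap; infer_instance

-- ===== CLAIM (what is proved, stated in full; the proofs are below) =====
def Claim_equal_calc_question_overlap : Prop := ∀ (question_concepts : List (String × List String)), Dom_calc_question_overlap question_concepts → Pre_calc_question_overlap question_concepts → Spec_calc_question_overlap question_concepts (calc_question_overlap question_concepts)

-- ===== LEMMAS AND PROOFS =====

def pvCntA (qc : List (String × List String)) (q q2 : String) : Int :=
  ((PySem.Set.inter (PySem.Set.ofList (pvLookA qc q)) (PySem.Set.ofList (pvLookA qc q2))).length : Int)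

-- fold over a flatMap is the nested fold
theorem pv_foldl_flatMap {α β γ : Type} (l : List α) (f : α → List β) (g : γ → β → γ) (i : γ) :
    (l.flatMap f).foldl g i = l.foldl (fun a x => (f x).foldl g a) i := by
  simp [List.flatMap, List.foldl_flatten, List.foldl_map]

theorem pv_flatMap_ite_singleton {α β : Type} (l : List α) (p : α → Bool) (f : α → β) :
    (l.flatMap (fun x => if p x then [f x] else [])) = (l.filter p).map f := by
  induction l with
  | nil => rfl
  | cons a t ih => by_cases h : p a <;> simp [h, ih]

theorem pv_sum_map_ite_const {α : Type} [DecidableEq α] (l : List α) (q : α) (K : Nat) :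
    (l.map (fun a => if a = q then K else 0)).sum = l.count q * K := by
  induction l with
  | nil => simp
  | cons a t ih =>
      by_cases h : a = q <;>
        simp [h, ih, Nat.add_mul, Nat.add_comm]

def pvPairsOf (b : List String) : List (String × String) :=
  b.flatMap (fun q => (b.filter (fun q2 => q2 != q)).map (fun q2 => (q, q2)))

theorem pv_count_pairsOf (b : List String) (hb : b.Nodup) (q q2 : String) (hne : q2 ≠ q) :
    (pvPairsOf b).count (q, q2) = (if q ∈ b ∧ q2 ∈ b then 1 else 0) := by
  unfold pvPairsOf
  rw [List.flatMap, List.count_flatten, List.map_map]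
  have hmap : ∀ a : String,
      (((b.filter (fun x => x != a)).map (fun x => (a, x))).count (q, q2)) =
      (if a = q then (if q2 ∈ b then 1 else 0) else 0) := by
    intro a
    by_cases ha : a = q
    · subst ha
      have hinj : Function.Injective (fun x : String => (a, x)) := by
        intro x y hxy; simpa using hxy
      have := List.count_map_of_injective (b.filter (fun x => x != a)) _ hinj q2
      simp only [this]
      by_cases h2 : q2 ∈ b
      · rw [List.count_filter (by simpa using hne)]
        simp [List.count_eq_one_of_mem hb h2, h2]
      · have : q2 ∉ b.filter (fun x => x != a) := fun h => h2 (List.mem_of_mem_filter h)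
        simp [h2, List.count_eq_zero_of_not_mem this]
    · have : (q, q2) ∉ (b.filter (fun x => x != a)).map (fun x => (a, x)) := by
        intro h
        rcases List.mem_map.1 h with ⟨x, _, hx⟩
        have h1 : a = q := by simpa using congrArg Prod.fst hx
        exact ha h1
      simp [List.count_eq_zero_of_not_mem this, ha]
  calc ((b.map (fun a => ((b.filter (fun x => x != a)).map (fun x => (a, x))).count (q, q2))).sum)
      = (b.map (fun a => if a = q then (if q2 ∈ b then 1 else 0) else 0)).sum := by
        exact congrArg List.sum (List.map_congr_left (fun a _ => hmap a))
    _ = b.count q * (if q2 ∈ b then 1 else 0) := pv_sum_map_ite_const b q _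
    _ = (if q ∈ b ∧ q2 ∈ b then 1 else 0) := by
        by_cases h1 : q ∈ b <;> by_cases h2 : q2 ∈ b <;>
          simp [h1, h2, List.count_eq_one_of_mem hb, List.count_eq_zero_of_not_mem]

def pvInv (qc : List (String × List String)) : PySem.Dict String (List String) :=
  qc.foldl (fun inv p =>
      (PySem.Set.ofList p.2).foldl (fun inv c => inv.modify c [] (· ++ [p.1])) inv)
    PySem.Dict.empty

def pvPairs (qc : List (String × List String)) : List (String × String) :=
  qc.flatMap (fun p => (PySem.Set.ofList p.2).map (fun c => (c, p.1)))

theorem pv_inv_eq_pairs_fold (qc : List (String × List String)) :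
    pvInv qc = (pvPairs qc).foldl (fun d pr => d.modify pr.1 [] (· ++ [pr.2])) PySem.Dict.empty := by
  unfold pvInv pvPairs
  rw [pv_foldl_flatMap]
  simp [List.foldl_map]

theorem pv_inv_getD (qc : List (String × List String)) (c : String) :
    (pvInv qc).getD c [] =
      (qc.filter (fun p => (PySem.Set.ofList p.2).contains c)).map (fun p => p.1) := by
  rw [pv_inv_eq_pairs_fold, PySem.Dict.getD_foldl_modify_append]
  rw [PySem.Dict.getD_empty]
  unfold pvPairs
  have hp : ∀ p : String × List String,
      (((PySem.Set.ofList p.2).map (fun c' => (c', p.1))).filter (fun x => x.1 == c)).map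
          (fun x => x.2) =
        if (PySem.Set.ofList p.2).contains c then [p.1] else [] := by
    intro p
    rw [List.filter_map, List.map_map]
    have hbeq : ((fun x : String × String => x.1 == c) ∘ fun c' => (c', p.1)) =
        (fun c' => c' == c) := rfl
    rw [hbeq, List.filter_beq]
    by_cases hc : c ∈ PySem.Set.ofList p.2
    · have h1 : (PySem.Set.ofList p.2).count c = 1 :=
        List.count_eq_one_of_mem (PySem.Set.nodup_ofList _) hc
      simp [hc]
    · have h0 : (PySem.Set.ofList p.2).count c = 0 := List.count_eq_zero_of_not_mem hc
      simp [h0, hc]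
  rw [List.flatMap, List.filter_flatten, List.map_map]
  calc ([] : List String) ++
        ((List.map ((List.filter fun p : String × String => p.1 == c) ∘
            fun p : String × List String => List.map (fun c => (c, p.1)) (PySem.Set.ofList p.2)) qc).flatten).map
          (fun x => x.2)
      = (qc.map (fun p =>
          (((PySem.Set.ofList p.2).map (fun c' => (c', p.1))).filter (fun x => x.1 == c)).map
            (fun x => x.2))).flatten := by
        rw [List.nil_append, List.map_flatten, List.map_map]
        exact congrArg List.flatten (List.map_congr_left (fun p _ => rfl))
    _ = (qc.map (fun p => if (PySem.Set.ofList p.2).contains c then ([p.1] : List String) else [])).flatten := by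
        exact congrArg List.flatten (List.map_congr_left (fun p _ => hp p))
    _ = (qc.filter (fun p => (PySem.Set.ofList p.2).contains c)).map (fun p => p.1) := by
        rw [← List.flatMap]
        exact pv_flatMap_ite_singleton qc _ _

theorem pv_inv_keys (qc : List (String × List String)) :
    (pvInv qc).keys = PySem.Set.ofList ((pvPairs qc).map (fun pr => pr.1)) := by
  rw [pv_inv_eq_pairs_fold]
  rw [PySem.Dict.keys_foldl_modify_key (key := fun pr : String × String => pr.1)]
  rfl

def pvPC (qc : List (String × List String)) : PySem.Dict (String × String) Int :=
  (pvInv qc).values.foldl (fun pair_count bucket =>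
    bucket.foldl (fun pair_count q =>
      bucket.foldl (fun pair_count q2 =>
        if q2 != q then pair_count.modify (q, q2) 0 (· + 1) else pair_count)
        pair_count) pair_count) PySem.Dict.empty

theorem pv_pc_eq_fold (qc : List (String × List String)) :
    pvPC qc = ((pvInv qc).values.flatMap pvPairsOf).foldl
      (fun d pr => d.modify pr 0 (· + 1)) PySem.Dict.empty := by
  unfold pvPC
  rw [pv_foldl_flatMap]
  apply PySem.List.foldl_congr_mem
  intro d b _
  unfold pvPairsOf
  rw [pv_foldl_flatMap]
  apply PySem.List.foldl_congr_mem
  intro d' a _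
  rw [List.foldl_map]
  exact PySem.List.foldl_if_eq_foldl_filter (fun q2 => q2 != a)
    (fun (pc : PySem.Dict (String × String) Int) q2 => pc.modify (a, q2) 0 (· + 1)) b d'

theorem pv_pc_getD (qc : List (String × List String)) (pr : String × String) :
    (pvPC qc).getD pr 0 = (((pvInv qc).values.flatMap pvPairsOf).count pr : Int) := by
  rw [pv_pc_eq_fold, PySem.Dict.getD_foldl_modify_add_one, PySem.Dict.getD_empty]
  simp

-- the inner loop of A builds exactly the row of intersection counts
theorem pv_A_inner (qc : List (String × List String)) (q : String)
    (h : (qc.map (fun p => p.1)).Nodup) :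
    (qc.foldl (fun (inner : PySem.Dict String Int) p2 =>
        if p2.1 == q then inner
        else inner.insert p2.1
          ((PySem.Set.inter (PySem.Set.ofList (pvLookA qc q))
              (PySem.Set.ofList (pvLookA qc p2.1))).length : Int)) PySem.Dict.empty).items =
      (qc.filter (fun p2 => p2.1 != q)).map (fun p2 => (p2.1, pvCntA qc q p2.1)) := by
  have hflip : qc.foldl (fun (inner : PySem.Dict String Int) p2 =>
        if p2.1 == q then inner
        else inner.insert p2.1
          ((PySem.Set.inter (PySem.Set.ofList (pvLookA qc q))
              (PySem.Set.ofList (pvLookA qc p2.1))).length : Int)) PySem.Dict.empty =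
      qc.foldl (fun (inner : PySem.Dict String Int) p2 =>
        if p2.1 != q then inner.insert p2.1 (pvCntA qc q p2.1) else inner) PySem.Dict.empty := by
    apply PySem.List.foldl_congr_mem
    intro d p2 _
    by_cases hb : p2.1 == q
    · have hq : p2.1 = q := eq_of_beq hb
      simp [hq]
    · simp only [hb, Bool.not_false, bne, if_true]
      rfl
  rw [hflip, PySem.List.foldl_if_eq_foldl_filter (p := fun p2 : String × List String => p2.1 != q)
    (f := fun (inner : PySem.Dict String Int) p2 => inner.insert p2.1 (pvCntA qc q p2.1))]
  rw [PySem.Dict.items_foldl_insert_fresh (k := fun p2 : String × List String => p2.1)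
    (v := fun p2 => pvCntA qc q p2.1)]
  · rfl
  · intro a _; exact PySem.Dict.contains_empty _
  · exact h.sublist (List.Sublist.map (fun p => p.1) (List.filter_sublist (l := qc)))

theorem pv_A_eq (qc : List (String × List String)) (h : (qc.map (fun p => p.1)).Nodup) :
    calc_question_overlap qc =
      qc.map (fun p => (p.1,
        (qc.filter (fun p2 => p2.1 != p.1)).map (fun p2 => (p2.1, pvCntA qc p.1 p2.1)))) := by
  unfold calc_question_overlap
  dsimp only
  rw [PySem.Dict.items_foldl_insert_fresh (k := fun p : String × List String => p.1)
      (v := fun p => qc.foldl (fun (inner : PySem.Dict String Int) p2 =>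
          if p2.1 == p.1 then inner
          else inner.insert p2.1
            ((PySem.Set.inter (PySem.Set.ofList (pvLookA qc p.1))
                (PySem.Set.ofList (pvLookA qc p2.1))).length : Int)) PySem.Dict.empty)
      (hdis := fun a _ => PySem.Dict.contains_empty _) (hnd := h)]
  show (List.map _ (([] : List (String × PySem.Dict String Int)) ++ _)) = _
  rw [List.nil_append, List.map_map]
  exact List.map_congr_left (fun p _ => by
    dsimp only [Function.comp]
    rw [pv_A_inner qc p.1 h])

theorem pv_entry_unique (qc : List (String × List String)) (h : (qc.map (fun p => p.1)).Nodup)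
    {p p' : String × List String} (hp : p ∈ qc) (hp' : p' ∈ qc) (he : p.1 = p'.1) : p = p' := by
  have := List.inj_on_of_nodup_map h
  have h2 := this hp hp' he
  exact h2

theorem pv_look_entry (qc : List (String × List String)) (h : (qc.map (fun p => p.1)).Nodup)
    {p : String × List String} (hp : p ∈ qc) : pvLookA qc p.1 = p.2 := by
  unfold pvLookA
  have hkeys : (PySem.Dict.mk qc).keys.Nodup := by simpa using h
  have hit : (p.1, p.2) ∈ (PySem.Dict.mk qc).items := by simpa using hp
  exact PySem.Dict.getD_of_mem_items _ hit hkeys _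

theorem pv_bucket_nodup (qc : List (String × List String)) (h : (qc.map (fun p => p.1)).Nodup)
    (c : String) : ((pvInv qc).getD c []).Nodup := by
  rw [pv_inv_getD]
  exact h.sublist (List.Sublist.map (fun p => p.1) (List.filter_sublist (l := qc)))

theorem pv_bucket_mem (qc : List (String × List String)) (h : (qc.map (fun p => p.1)).Nodup)
    {p : String × List String} (hp : p ∈ qc) (c : String) :
    p.1 ∈ (pvInv qc).getD c [] ↔ c ∈ PySem.Set.ofList p.2 := by
  rw [pv_inv_getD]
  constructor
  · intro hm
    rcases List.mem_map.1 hm with ⟨p', hp', he⟩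
    rcases List.mem_filter.1 hp' with ⟨hp'q, hc⟩
    have : p' = p := pv_entry_unique qc h hp'q hp he
    subst this
    simpa [List.elem_iff] using hc
  · intro hc
    exact List.mem_map.2 ⟨p, List.mem_filter.2 ⟨hp, by simpa [List.elem_iff] using hc⟩, rfl⟩

theorem pv_mem_keys_iff (qc : List (String × List String)) (c : String) :
    c ∈ (pvInv qc).keys ↔ ∃ p ∈ qc, c ∈ PySem.Set.ofList p.2 := by
  rw [pv_inv_keys]
  rw [PySem.Set.mem_ofList]
  unfold pvPairs
  simp

theorem pv_count_eq_inter (qc : List (String × List String)) (h : (qc.map (fun p => p.1)).Nodup)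
    {pq pq2 : String × List String} (hq : pq ∈ qc) (hq2 : pq2 ∈ qc) (hne : pq2.1 ≠ pq.1) :
    ((pvInv qc).values.flatMap pvPairsOf).count (pq.1, pq2.1) =
      ((PySem.Set.ofList (pvLookA qc pq.1)).inter (PySem.Set.ofList (pvLookA qc pq2.1))).length := by
  have hknd : (pvInv qc).keys.Nodup := by rw [pv_inv_keys]; exact PySem.Set.nodup_ofList _
  rw [PySem.Dict.values_eq_map_keys (pvInv qc) hknd []]
  rw [List.flatMap, List.map_map, List.count_flatten, List.map_map]
  have hcnt : ∀ c ∈ (pvInv qc).keys,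
      ((pvPairsOf ((pvInv qc).getD c [])).count (pq.1, pq2.1)) =
      (if (c ∈ PySem.Set.ofList pq.2 ∧ c ∈ PySem.Set.ofList pq2.2) then 1 else 0) := by
    intro c _
    rw [pv_count_pairsOf _ (pv_bucket_nodup qc h c) _ _ hne]
    simp only [pv_bucket_mem qc h hq c, pv_bucket_mem qc h hq2 c]
  rw [show (List.count (pq.1, pq2.1) ∘ pvPairsOf ∘ fun k => (pvInv qc).getD k []) =
        (fun c => List.count (pq.1, pq2.1) (pvPairsOf ((pvInv qc).getD c []))) from rfl]
  rw [List.map_congr_left hcnt]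
  have hite : ∀ c : String,
      (if (c ∈ PySem.Set.ofList pq.2 ∧ c ∈ PySem.Set.ofList pq2.2) then 1 else 0) =
      (if (decide (c ∈ PySem.Set.ofList pq.2 ∧ c ∈ PySem.Set.ofList pq2.2) : Bool) then 1 else 0) := by
    intro c; by_cases hc : c ∈ PySem.Set.ofList pq.2 ∧ c ∈ PySem.Set.ofList pq2.2 <;> simp [hc]
  rw [List.map_congr_left (fun c _ => hite c)]
  rw [PySem.List.sum_map_ite_one_zero_nat]
  rw [List.countP_eq_length_filter]
  have hS1 : PySem.Set.ofList (pvLookA qc pq.1) = PySem.Set.ofList pq.2 := by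
    rw [pv_look_entry qc h hq]
  have hS2 : PySem.Set.ofList (pvLookA qc pq2.1) = PySem.Set.ofList pq2.2 := by
    rw [pv_look_entry qc h hq2]
  rw [hS1, hS2]
  -- both sides are lengths of dup-free lists with the same members
  have hperm : ((pvInv qc).keys.filter
        (fun c => decide (c ∈ PySem.Set.ofList pq.2 ∧ c ∈ PySem.Set.ofList pq2.2))).Perm
      ((PySem.Set.ofList pq.2).inter (PySem.Set.ofList pq2.2)) := by
    apply (List.perm_ext_iff_of_nodup (hknd.filter _) ?_).mpr
    · intro c
      rw [List.mem_filter]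
      constructor
      · rintro ⟨-, hc⟩
        have hc' := of_decide_eq_true hc
        show c ∈ List.filter _ _
        rw [List.mem_filter]
        exact ⟨hc'.1, by simpa [List.elem_iff] using hc'.2⟩
      · intro hc
        rw [show ((PySem.Set.ofList pq.2).inter (PySem.Set.ofList pq2.2)) =
              List.filter (fun x => (PySem.Set.ofList pq2.2).contains x) (PySem.Set.ofList pq.2) from rfl,
            List.mem_filter] at hc
        have h1 : c ∈ PySem.Set.ofList pq.2 := hc.1
        have h2 : c ∈ PySem.Set.ofList pq2.2 := by simpa [List.elem_iff] using hc.2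
        refine ⟨?_, by simp [h1, h2]⟩
        exact (pv_mem_keys_iff qc c).mpr ⟨pq, hq, h1⟩
    · exact (PySem.Set.nodup_ofList _).filter _
  exact hperm.length_eq

theorem pv_main (qc : List (String × List String)) (h : (qc.map (fun p => p.1)).Nodup) :
    calc_question_overlap qc = calc_question_overlap_alt qc := by
  rw [pv_A_eq qc h]
  unfold calc_question_overlap_alt
  dsimp only
  apply List.map_congr_left
  intro p hp
  refine congrArg (fun r => (p.1, r)) ?_
  apply List.map_congr_left
  intro p2 hp2
  rcases List.mem_filter.1 hp2 with ⟨hp2q, hne⟩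
  have hne' : p2.1 ≠ p.1 := by simpa using hne
  refine congrArg (fun r => (p2.1, r)) ?_
  have hpc : (pvPC qc).getD (p.1, p2.1) 0 =
      (((pvInv qc).values.flatMap pvPairsOf).count (p.1, p2.1) : Int) := pv_pc_getD qc _
  have := pv_count_eq_inter qc h hp hp2q hne'
  unfold pvCntA
  rw [show (qc.foldl (fun inv p =>
      (PySem.Set.ofList p.2).foldl (fun inv c => inv.modify c [] (· ++ [p.1])) inv)
      PySem.Dict.empty) = pvInv qc from rfl]
  rw [show ((pvInv qc).values.foldl (fun pair_count bucket =>
      bucket.foldl (fun pair_count q =>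
        bucket.foldl (fun pair_count q2 =>
          if q2 != q then pair_count.modify (q, q2) 0 (· + 1) else pair_count)
          pair_count) pair_count) PySem.Dict.empty) = pvPC qc from rfl]
  rw [hpc, this]

-- ===== VERDICT (by name: the statement is the Claim_ definition above) =====
theorem calc_question_overlap_spec : Claim_equal_calc_question_overlap := by
  intro qc _ hpre
  exact pv_main qc hpre
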